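-- pv_equiv track=rewrite | github.com/thesadru/pacman | pacman/create_level.py | convert_fromstring
-- ===== SOURCE A (Python) =====
-- def convert_fromstring(x,long):
--     count = -1
--     row = -1
--     outcome = []
--     for i in x:
--         try:
--             i = int(i)
--             count += 1
--             if count%long == 0:
--                 row += 1
--                 outcome.append([i])
--                 continue
--             outcome[row] += [i]
--         except:
--             pass
--     return outcome
-- ===== SOURCE B (Python) =====
-- def convert_fromstring(x, long):
--     digits = [int(c) for c in x if c.isdigit()]
--     return [digits[i:i+long] for i in range(0, len(digits), long)]
-- ===== Notes on version B (the rewrite author's own statement) =====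
-- stated objective: simpler
-- what changed: B is two comprehensions: collect the digit characters, then cut the flat list into rows by slicing at offsets 0, long, 2*long, ..., instead of A's single stateful loop with a running counter, a row index, a modulo test and in-place appends; Pre_ restricts to positive row width long >= 1, the function's natural domain: at long = 0 A's [] comes only from a swallowed ZeroDivisionError (B raises ValueError from range), and at negative long A's grouping by |long| is an accident of Python's modulo sign convention (B naturally returns []).
-- outside the precondition, e.g. on convert_fromstring('1', 0): A returns [], B raises ValueError; on convert_fromstring('12', -2): A returns [[1, 2]], B returns []
import Mathlib
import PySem

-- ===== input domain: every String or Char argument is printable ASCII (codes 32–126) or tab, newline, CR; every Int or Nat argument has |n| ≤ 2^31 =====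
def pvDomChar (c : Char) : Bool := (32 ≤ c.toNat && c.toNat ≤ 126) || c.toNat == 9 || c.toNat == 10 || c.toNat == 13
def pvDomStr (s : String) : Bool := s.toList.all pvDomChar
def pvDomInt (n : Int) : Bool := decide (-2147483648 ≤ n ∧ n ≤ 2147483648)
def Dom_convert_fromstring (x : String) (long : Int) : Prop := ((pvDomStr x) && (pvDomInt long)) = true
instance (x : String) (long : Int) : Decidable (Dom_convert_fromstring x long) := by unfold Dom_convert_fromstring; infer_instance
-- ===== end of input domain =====

-- B parses the digit characters in one comprehension and cuts the flat list into rows by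
-- slicing at offsets 0, long, 2·long, … instead of A's stateful counter/modulo loop (simpler).

-- ===== PORT A =====
-- the for-loop of A: state (count, row, outcome); a bare 'except: pass' swallows the
-- ValueError of int(i), the ZeroDivisionError of count % 0 and a possible IndexError,
-- always AFTER 'count += 1' has happened in the latter two cases.
def pvA_loop (long : Int) : List Char → Int → Int → List (List Int) → List (List Int)
  | [], _, _, outcome => outcome
  | c :: cs, count, row, outcome =>
    match PySem.Int.ofChars? [c] with
    | none => pvA_loop long cs count row outcome          -- int(i) raised → pass
    | some n =>
      match PySem.Int.mod? (count + 1) long with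
      | none => pvA_loop long cs (count + 1) row outcome  -- count % 0 raised → pass
      | some m =>
        if m = 0 then
          pvA_loop long cs (count + 1) (row + 1) (outcome ++ [[n]])
        else
          match PySem.List.pyGet? outcome row with
          | none => pvA_loop long cs (count + 1) row outcome   -- outcome[row] raised → pass
          | some r => pvA_loop long cs (count + 1) row (PySem.List.pySetD outcome row (r ++ [n]))

def convert_fromstring (x : String) (long : Int) : List (List Int) :=
  pvA_loop long x.toList (-1) (-1) []

-- ===== PORT B =====
-- '[int(c) for c in x if c.isdigit()]'; int(c) is PySem.Int.ofChars? [c] (it always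
-- succeeds when c.isdigit(), so the comprehension is a filterMap)
def pvB_digits (cs : List Char) : List Int :=
  cs.filterMap (fun c => if PySem.Chars.isdigit c then PySem.Int.ofChars? [c] else none)

-- '[digits[i:i+long] for i in range(0, len(digits), long)]'
def convert_fromstring_alt (x : String) (long : Int) : List (List Int) :=
  let digits := pvB_digits x.toList
  (PySem.List.pyRange 0 (digits.length : Int) long).map
    (fun i => PySem.List.slice digits (some i) (some (i + long)))

-- ===== PRECONDITION & SPEC =====
-- Pre_ restricts to positive row width long ≥ 1, the function's natural domain: at long = 0
-- A's [] comes only from a swallowed ZeroDivisionError (B raises ValueError from range), and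
-- at negative long A's grouping by |long| is an accident of Python's modulo sign (B returns []).
def Pre_convert_fromstring (x : String) (long : Int) : Prop := 1 ≤ long
instance (x : String) (long : Int) : Decidable (Pre_convert_fromstring x long) := by unfold Pre_convert_fromstring; infer_instance
def pvWitness_convert_fromstring : String × Int := ("1a2 345", 2)

def Spec_convert_fromstring (x : String) (long : Int) (out : List (List Int)) : Prop := out = convert_fromstring_alt x long
instance (x : String) (long : Int) (out : List (List Int)) : Decidable (Spec_convert_fromstring x long out) := by unfold Spec_convert_fromstring; infer_instance

-- ===== CLAIM (what is proved, stated in full; the proofs are below) =====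
def Claim_equal_convert_fromstring : Prop := ∀ (x : String) (long : Int), Dom_convert_fromstring x long → Pre_convert_fromstring x long → Spec_convert_fromstring x long (convert_fromstring x long)

-- ===== LEMMAS AND PROOFS =====

-- A's digit extraction, read off from pvA_loop (proof-side helper)
def pvDigitsA : List Char → List Int
  | [] => []
  | c :: cs =>
    match PySem.Int.ofChars? [c] with
    | some n => n :: pvDigitsA cs
    | none => pvDigitsA cs

-- on the ASCII range, the 'c.isdigit()' guard of B is redundant before int(c)
theorem pvChar128 : ∀ k : Nat, k < 128 →
    (if PySem.Chars.isdigit (Char.ofNat k) then PySem.Int.ofChars? [Char.ofNat k] else none)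
      = PySem.Int.ofChars? [Char.ofNat k] := by decide

theorem pvDigits_eq (cs : List Char) (h : ∀ c ∈ cs, c.toNat < 128) :
    pvB_digits cs = pvDigitsA cs := by
  induction cs with
  | nil => rfl
  | cons c cs ih =>
    have hc := pvChar128 c.toNat (h c (by simp))
    rw [Char.ofNat_toNat] at hc
    have ih' := ih (fun d hd => h d (by simp [hd]))
    unfold pvB_digits at ih' ⊢
    simp only [List.filterMap_cons]
    rw [hc]
    unfold pvDigitsA
    cases PySem.Int.ofChars? [c] with
    | none => simpa using ih'
    | some n => simpa using ih'

-- chunking a flat list into rows of w (proof-side bridge between the two ports)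
def pvChunks (w : Nat) : List Int → List (List Int)
  | [] => []
  | d :: tl => (d :: tl.take (w - 1)) :: pvChunks w (tl.drop (w - 1))
  termination_by l => l.length
  decreasing_by simp

theorem pvChunks_nil (w : Nat) : pvChunks w [] = [] := by
  unfold pvChunks; rfl

theorem pvChunks_cons (w : Nat) (d : Int) (tl : List Int) :
    pvChunks w (d :: tl) = (d :: tl.take (w - 1)) :: pvChunks w (tl.drop (w - 1)) := by
  conv_lhs => unfold pvChunks

theorem pvChunks_cons_eq (w : Nat) (hw : 1 ≤ w) (l : List Int) (hl : l ≠ []) :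
    pvChunks w l = l.take w :: pvChunks w (l.drop w) := by
  obtain ⟨v, rfl⟩ : ∃ v, w = v + 1 := ⟨w - 1, by omega⟩
  cases l with
  | nil => exact absurd rfl hl
  | cons d tl => simp [pvChunks_cons, List.take_succ_cons, List.drop_succ_cons]

-- intermediate one-pass grouping (proof-side; equal to A's loop and to B's reshape)
def pvB_group (w : Nat) : List Int → List (List Int) → List (List Int)
  | [], rows => rows
  | d :: ds, rows =>
    match rows.getLast? with
    | some r =>
      if r.length < w then pvB_group w ds (rows.dropLast ++ [r ++ [d]])
      else pvB_group w ds (rows ++ [[d]])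
    | none => pvB_group w ds (rows ++ [[d]])

theorem pvGroup_acc (w : Nat) (hw : 1 ≤ w) (ds : List Int) :
    ∀ (init : List (List Int)) (last : List Int), 1 ≤ last.length → last.length ≤ w →
      pvB_group w ds (init ++ [last]) = init ++ pvChunks w (last ++ ds) := by
  induction ds with
  | nil =>
    intro init last h1 h2
    cases last with
    | nil => simp at h1
    | cons d tl =>
      simp only [List.append_nil, pvB_group, pvChunks_cons]
      simp at h2
      rw [List.take_of_length_le (by omega), List.drop_eq_nil_of_le (by omega), pvChunks_nil]
  | cons d ds ih =>
    intro init last h1 h2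
    unfold pvB_group
    rw [List.getLast?_concat]
    dsimp only
    by_cases hfull : last.length < w
    · rw [if_pos hfull]
      rw [List.dropLast_concat]
      rw [ih init (last ++ [d]) (by simp) (by simp; omega)]
      simp
    · rw [if_neg hfull]
      have hlw : last.length = w := by omega
      have := ih (init ++ [last]) [d] (by simp) (by simpa using hw)
      rw [show init ++ [last] ++ [[d]] = (init ++ [last]) ++ [[d]] by simp] at *
      rw [this]
      rw [pvChunks_cons_eq w hw (last ++ d :: ds) (by simp)]
      rw [show last ++ d :: ds = last ++ (d :: ds) from rfl]
      rw [← hlw, List.take_left, List.drop_left]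
      simp

theorem pvGroup_nil (w : Nat) (hw : 1 ≤ w) (ds : List Int) :
    pvB_group w ds [] = pvChunks w ds := by
  cases ds with
  | nil => rw [pvChunks_nil]; rfl
  | cons d ds =>
    unfold pvB_group
    simp only [List.getLast?_nil]
    have := pvGroup_acc w hw ds [] [d] (by simp) (by simpa using hw)
    simpa using this

-- invariant tying A's (count, row, outcome) to the chunk shape of the grouping
def pvInv (w : Nat) (count row : Int) (outcome : List (List Int)) : Prop :=
  (outcome = [] ∧ count = -1 ∧ row = -1) ∨
  (∃ init last, outcome = init ++ [last] ∧ (∀ c ∈ init, c.length = w) ∧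
      1 ≤ last.length ∧ last.length ≤ w ∧
      count = (init.length : Int) * w + last.length - 1 ∧ row = (init.length : Int))

theorem pv_set_concat {α : Type} (init : List α) (last v : α) :
    (init ++ [last]).set init.length v = init ++ [v] := by
  induction init with
  | nil => rfl
  | cons a init ih => simp [ih]

-- main invariant lemma: for long ≠ 0, A's loop continues exactly as the grouping of the
-- remaining digits from the same outcome
theorem pvA_loop_eq_group (long : Int) (hl : long ≠ 0) (cs : List Char) :
    ∀ (count row : Int) (outcome : List (List Int)), pvInv long.natAbs count row outcome →
      pvA_loop long cs count row outcome = pvB_group long.natAbs (pvDigitsA cs) outcome := by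
  induction cs with
  | nil => intro _ _ _ _; rfl
  | cons c cs ih =>
    intro count row outcome hinv
    unfold pvA_loop pvDigitsA
    cases PySem.Int.ofChars? [c] with
    | none => exact ih count row outcome hinv
    | some n =>
      have hw1 : 1 ≤ long.natAbs := by omega
      have hmod : PySem.Int.mod? (count + 1) long = some (PySem.Int.mod (count + 1) long) := by
        simp [PySem.Int.mod?, PySem.Int.mod, hl]
      have hdvd : PySem.Int.mod (count + 1) long = 0 ↔ (long.natAbs : Int) ∣ (count + 1) := by
        rw [PySem.Int.mod_eq_zero_iff_dvd]
        exact ⟨fun h => (Int.natAbs_dvd).mpr h, fun h => (Int.natAbs_dvd).mp h⟩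
      rw [hmod]
      dsimp only
      unfold pvB_group
      rcases hinv with ⟨ho, hc, hr⟩ | ⟨init, last, ho, hfull, h1, h2, hc, hr⟩
      · subst ho; subst hc; subst hr
        have hm0 : PySem.Int.mod (-1 + 1) long = 0 := by rw [hdvd]; simp
        rw [if_pos hm0, List.getLast?_nil]
        dsimp only
        simp only [List.nil_append]
        exact ih 0 0 [[n]] (Or.inr ⟨[], [n], by simp, by simp, by simp, by simpa using hw1,
          by simp, by simp⟩)
      · subst ho; subst hc; subst hr
        rw [List.getLast?_concat]
        dsimp only
        by_cases hfullLast : last.length = long.natAbs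
        · -- last row is full: both start a new row
          have hm0 : PySem.Int.mod ((init.length : Int) * long.natAbs + last.length - 1 + 1) long = 0 := by
            rw [hdvd]
            have heq : ((init.length : Int) * long.natAbs + last.length - 1 + 1)
                = ((init.length : Int) + 1) * long.natAbs := by rw [hfullLast]; push_cast; ring
            rw [heq]
            exact dvd_mul_left _ _
          rw [if_pos hm0, if_neg (by omega : ¬ last.length < long.natAbs)]
          refine ih _ _ _ (Or.inr ⟨init ++ [last], [n], by simp, ?_, by simp,
            by simpa using hw1, ?_, by simp⟩)
          · intro cch hmem
            rcases List.mem_append.mp hmem with h | h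
            · exact hfull _ h
            · simp at h; subst h; exact hfullLast
          · simp only [List.length_append, List.length_singleton, hfullLast]; push_cast; ring
        · -- last row not full: both append to the last row
          have hlt : last.length < long.natAbs := by omega
          have hm0 : ¬ PySem.Int.mod ((init.length : Int) * long.natAbs + last.length - 1 + 1) long = 0 := by
            rw [hdvd]
            intro hd
            have heq : ((init.length : Int) * long.natAbs + last.length - 1 + 1)
                = (init.length : Int) * long.natAbs + (last.length : Int) := by ring
            rw [heq] at hd
            have hd2 : (long.natAbs : Int) ∣ (last.length : Int) :=
              (Int.dvd_add_right (Dvd.intro_left _ rfl)).mp hd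
            have hd3 : long.natAbs ∣ last.length := by exact_mod_cast hd2
            have := Nat.le_of_dvd (by omega) hd3
            omega
          rw [if_neg hm0, if_pos hlt]
          have hget : PySem.List.pyGet? (init ++ [last]) (init.length : Int) = some last := by
            rw [PySem.List.pyGet?_natCast]
            simp
          rw [hget]
          dsimp only
          have hset : PySem.List.pySetD (init ++ [last]) (init.length : Int) (last ++ [n])
              = init ++ [last ++ [n]] := by
            rw [PySem.List.pySetD_natCast]
            exact pv_set_concat init last (last ++ [n])
          rw [hset]
          have hdrop : (init ++ [last]).dropLast ++ [last ++ [n]] = init ++ [last ++ [n]] := by simp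
          rw [hdrop]
          refine ih _ _ _ (Or.inr ⟨init, last ++ [n], rfl, hfull, by simp, by simp; omega, ?_, rfl⟩)
          simp only [List.length_append, List.length_singleton]
          push_cast; ring

-- range with positive step: empty and cons forms, and translation invariance
theorem pvRange_pos_nil (a b s : Int) (hs : 0 < s) (h : b ≤ a) :
    PySem.List.pyRange a b s = [] := by
  rw [PySem.List.pyRange_of_pos _ _ hs, if_neg (by omega)]
  rfl

theorem pvRange_pos_cons (a b s : Int) (hs : 0 < s) (h : a < b) :
    PySem.List.pyRange a b s = a :: PySem.List.pyRange (a + s) b s := by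
  rw [PySem.List.pyRange_of_pos _ _ hs, PySem.List.pyRange_of_pos _ _ hs, if_pos h]
  have hstep : (b - a + s - 1) / s = (b - a - 1) / s + 1 := by
    rw [show b - a + s - 1 = (b - a - 1) + 1 * s by ring, Int.add_mul_ediv_right _ _ (by omega)]
  have hq0 : 0 ≤ (b - a - 1) / s := Int.ediv_nonneg (by omega) (by omega)
  have hcount : ((b - a + s - 1) / s).toNat = ((b - a - 1) / s).toNat + 1 := by
    rw [hstep]; omega
  have hcount' : (if a + s < b then ((b - (a + s) + s - 1) / s).toNat else 0)
      = ((b - a - 1) / s).toNat := by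
    by_cases hab : a + s < b
    · rw [if_pos hab, show b - (a + s) + s - 1 = b - a - 1 by ring]
    · rw [if_neg hab]
      have : (b - a - 1) / s = 0 := Int.ediv_eq_zero_of_lt (by omega) (by omega)
      omega
  rw [hcount, hcount', List.range_succ_eq_map, List.map_cons, List.map_map]
  refine congrArg₂ _ (by ring) ?_
  apply List.map_congr_left
  intro k _
  simp only [Function.comp_apply]
  push_cast
  ring

theorem pvRange_shift (b t s : Int) (hs : 0 < s) :
    PySem.List.pyRange t (b + t) s = (PySem.List.pyRange 0 b s).map (· + t) := by
  rw [PySem.List.pyRange_of_pos _ _ hs, PySem.List.pyRange_of_pos _ _ hs]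
  have hcount : (if t < b + t then ((b + t - t + s - 1) / s).toNat else 0)
      = (if 0 < b then ((b - 0 + s - 1) / s).toNat else 0) := by
    rw [show b + t - t + s - 1 = b - 0 + s - 1 by ring]
    exact if_congr (by omega) rfl rfl
  rw [hcount, List.map_map]
  apply List.map_congr_left
  intro k _
  simp only [Function.comp_apply]
  ring

-- B's reshape-by-slicing equals chunking
theorem pvReshape (w : Nat) (hw : 1 ≤ w) :
    ∀ (n : Nat) (ds : List Int), ds.length ≤ n →
      (PySem.List.pyRange 0 (ds.length : Int) (w : Int)).map
          (fun i => PySem.List.slice ds (some i) (some (i + (w : Int)))) = pvChunks w ds := by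
  intro n
  induction n with
  | zero =>
    intro ds hds
    have hnil : ds = [] := List.length_eq_zero_iff.mp (by omega)
    subst hnil
    simp only [List.length_nil, Nat.cast_zero]
    rw [pvRange_pos_nil 0 0 w (by exact_mod_cast hw) le_rfl, pvChunks_nil]
    rfl
  | succ m ih =>
    intro ds hds
    cases ds with
    | nil =>
      simp only [List.length_nil, Nat.cast_zero]
      rw [pvRange_pos_nil 0 0 w (by exact_mod_cast hw) le_rfl, pvChunks_nil]
      rfl
    | cons d tl =>
      have hws : (0 : Int) < (w : Int) := by exact_mod_cast hw
      have hlen : (0 : Int) < ((d :: tl).length : Int) := by simp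
      rw [pvRange_pos_cons 0 _ _ hws hlen, List.map_cons]
      have hhead : PySem.List.slice (d :: tl) (some 0) (some (0 + (w : Int))) = (d :: tl).take w := by
        rw [zero_add, PySem.List.slice_zero_start, PySem.List.slice_to _ (by omega)]
        simp
      rw [hhead, zero_add]
      rw [pvChunks_cons_eq w hw (d :: tl) (by simp)]
      by_cases hcase : (d :: tl).length ≤ w
      · rw [pvRange_pos_nil _ _ _ hws (by exact_mod_cast hcase)]
        rw [List.drop_eq_nil_of_le hcase, pvChunks_nil]
        rfl
      · -- w < length: shift the remaining range down by w and recurse on the dropped list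
        rw [not_le] at hcase
        have hdl : ((d :: tl).drop w).length = (d :: tl).length - w := by simp
        have hblen : ((d :: tl).length : Int) = ((((d :: tl).drop w).length : Nat) : Int) + (w : Int) := by
          rw [hdl]; omega
        rw [hblen, pvRange_shift _ _ _ hws, List.map_map]
        have hmap : ∀ i ∈ PySem.List.pyRange 0 ((((d :: tl).drop w).length : Nat) : Int) (w : Int),
            ((fun i => PySem.List.slice (d :: tl) (some i) (some (i + (w : Int)))) ∘ (· + (w : Int))) i
              = PySem.List.slice ((d :: tl).drop w) (some i) (some (i + (w : Int))) := by
          intro i hi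
          obtain ⟨hi0, -, -⟩ := (PySem.List.mem_pyRange_iff_of_pos hws i).mp hi
          simp only [Function.comp_apply]
          rw [PySem.List.slice_toNat _ (by omega) (by omega),
              PySem.List.slice_toNat _ (by omega) (by omega)]
          rw [List.drop_drop]
          have e1 : (i + (w : Int)).toNat = i.toNat + w := by omega
          have e2 : (i + (w : Int) + (w : Int)).toNat = i.toNat + w + w := by omega
          rw [e1, e2]
          congr 1
          · omega
          · rw [Nat.add_comm]
        rw [List.map_congr_left hmap]
        have hlen2 : ((d :: tl).drop w).length ≤ m := by
          simp only [List.length_drop, List.length_cons]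
          simp only [List.length_cons] at hds
          omega
        rw [ih ((d :: tl).drop w) hlen2]

-- ===== VERDICT (by name: the statement is the Claim_ definition above) =====
theorem convert_fromstring_spec : Claim_equal_convert_fromstring := by
  intro x long hdom hpre
  unfold Spec_convert_fromstring convert_fromstring convert_fromstring_alt
  have hpre' : (1 : Int) ≤ long := hpre
  have hl : long ≠ 0 := by omega
  have hw : 1 ≤ long.natAbs := by omega
  have hcast : ((long.natAbs : Nat) : Int) = long := by omega
  have hchars : ∀ c ∈ x.toList, c.toNat < 128 := by
    unfold Dom_convert_fromstring pvDomStr pvDomChar at hdom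
    simp only [Bool.and_eq_true, List.all_eq_true] at hdom
    intro c hc
    have := hdom.1 c hc
    simp only [Bool.or_eq_true, Bool.and_eq_true, decide_eq_true_eq, beq_iff_eq] at this
    omega
  rw [pvA_loop_eq_group long hl x.toList (-1) (-1) [] (Or.inl ⟨rfl, rfl, rfl⟩)]
  rw [pvGroup_nil long.natAbs hw (pvDigitsA x.toList)]
  rw [show pvB_digits x.toList = pvDigitsA x.toList from pvDigits_eq x.toList hchars]
  rw [← hcast]
  exact (pvReshape long.natAbs hw (pvDigitsA x.toList).length (pvDigitsA x.toList) le_rfl).symm
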